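-- pv_equiv track=rewrite | github.com/jharveyb/gossip_observer | infra/ansible/scripts/validate_collectors.py | validate_duplicate_uuids
-- ===== SOURCE A (Python) =====
-- def validate_duplicate_uuids(collectors: list[dict]) -> list[str]:
--     """Check for duplicate UUIDs in collectors list."""
--     errors = []
--     seen: dict[str, str] = {}  # uuid -> host
--     for c in collectors:
--         uuid = c["uuid"]
--         if uuid in seen:
--             errors.append(
--                 f"Duplicate UUID {uuid}... appears on both {seen[uuid]} and {c['host']}"
--             )
--         else:
--             seen[uuid] = c["host"]
--     return errors
-- ===== SOURCE B (Python) =====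
-- def validate_duplicate_uuids(collectors: list[dict]) -> list[str]:
--     """Check for duplicate UUIDs in collectors list."""
--     # Pass 1: first occurrence index of each uuid (setdefault never overwrites).
--     first_idx: dict[str, int] = {}
--     for i, c in enumerate(collectors):
--         first_idx.setdefault(c["uuid"], i)
--     # Pass 2: every element that is not the first occurrence of its uuid is a duplicate.
--     return [
--         f"Duplicate UUID {c['uuid']}... appears on both {collectors[first_idx[c['uuid']]]['host']} and {c['host']}"
--         for i, c in enumerate(collectors)
--         if first_idx[c["uuid"]] != i
--     ]
-- ===== Notes on version B (the rewrite author's own statement) =====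
-- stated objective: alternative
-- what changed: Replaces the single stateful loop (errors + seen dict grown as it goes) by two stateless passes: a first pass that records each uuid's first-occurrence index via setdefault, then a comprehension that emits an error for every element whose index is not its uuid's first index.
import Mathlib
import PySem

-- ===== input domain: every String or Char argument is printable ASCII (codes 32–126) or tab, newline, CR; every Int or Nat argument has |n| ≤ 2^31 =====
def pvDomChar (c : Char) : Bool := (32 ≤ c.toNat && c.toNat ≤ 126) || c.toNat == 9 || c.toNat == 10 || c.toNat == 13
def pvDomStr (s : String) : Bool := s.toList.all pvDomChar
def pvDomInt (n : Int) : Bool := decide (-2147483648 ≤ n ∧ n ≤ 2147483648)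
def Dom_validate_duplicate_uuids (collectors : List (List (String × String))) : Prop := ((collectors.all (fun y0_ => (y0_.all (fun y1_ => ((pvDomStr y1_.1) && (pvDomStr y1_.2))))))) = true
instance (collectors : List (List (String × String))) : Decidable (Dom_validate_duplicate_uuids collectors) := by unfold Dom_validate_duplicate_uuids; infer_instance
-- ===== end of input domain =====

-- B changes the decomposition only: two stateless passes (first-occurrence index map, then a
-- comprehension keyed on index equality) instead of A's single loop growing a seen-dict; same cost.

-- shared A/B helper: Python's c[k] on the dict c (assoc list, first match); "" is never
-- used under Pre_, which guarantees the key is present.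
def pvKeyD (c : List (String × String)) (k : String) : String :=
  ((c.find? (fun p => p.1 == k)).map (·.2)).getD ""

-- shared A/B helper: the exact f-string of both Pythons.
def pvMsg (u h1 h2 : String) : String :=
  "Duplicate UUID " ++ u ++ "... appears on both " ++ h1 ++ " and " ++ h2

-- ===== PORT A =====
-- A's loop: state (errors, seen); duplicate → append message, else record uuid → host.
def validate_duplicate_uuids (collectors : List (List (String × String))) : List String :=
  (collectors.foldl
    (fun (st : List String × PySem.Dict String String) c =>
      let uuid := pvKeyD c "uuid"
      if st.2.contains uuid then
        (st.1 ++ [pvMsg uuid (st.2.getD uuid "") (pvKeyD c "host")], st.2)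
      else
        (st.1, st.2.insert uuid (pvKeyD c "host")))
    ([], PySem.Dict.empty)).1

-- ===== PORT B =====
-- B pass 1: first-occurrence index of each uuid via setdefault over enumerate.
def pvFirstIdx (collectors : List (List (String × String))) : PySem.Dict String Int :=
  (PySem.List.enumerate collectors).foldl
    (fun d ic => d.setdefault (pvKeyD ic.2 "uuid") ic.1) PySem.Dict.empty

-- B pass 2: comprehension over enumerate; emit iff this index is not the uuid's first index.
def validate_duplicate_uuids_alt (collectors : List (List (String × String))) : List String :=
  (PySem.List.enumerate collectors).filterMap (fun ic =>
    let u := pvKeyD ic.2 "uuid"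
    if (pvFirstIdx collectors).getD u 0 ≠ ic.1 then
      some (pvMsg u
        (pvKeyD (PySem.List.pyGetD collectors ((pvFirstIdx collectors).getD u 0) []) "host")
        (pvKeyD ic.2 "host"))
    else none)

-- ===== PRECONDITION & SPEC =====
-- Pre_: exactly where Python A returns normally — every collector has both the
-- "uuid" and the "host" key (otherwise A raises KeyError).
def Pre_validate_duplicate_uuids (collectors : List (List (String × String))) : Prop :=
  (collectors.all (fun c => c.any (fun p => p.1 == "uuid") && c.any (fun p => p.1 == "host"))) = true
instance (collectors : List (List (String × String))) : Decidable (Pre_validate_duplicate_uuids collectors) := by unfold Pre_validate_duplicate_uuids; infer_instance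

def pvWitness_validate_duplicate_uuids : (List (List (String × String))) :=
  [[("uuid", "a"), ("host", "h1")], [("uuid", "a"), ("host", "h2")]]

def Spec_validate_duplicate_uuids (collectors : List (List (String × String))) (out : List String) : Prop := out = validate_duplicate_uuids_alt collectors
instance (collectors : List (List (String × String))) (out : List String) : Decidable (Spec_validate_duplicate_uuids collectors out) := by unfold Spec_validate_duplicate_uuids; infer_instance

-- ===== CLAIM (what is proved, stated in full; the proofs are below) =====
def Claim_equal_validate_duplicate_uuids : Prop := ∀ (collectors : List (List (String × String))), Dom_validate_duplicate_uuids collectors → Pre_validate_duplicate_uuids collectors → Spec_validate_duplicate_uuids collectors (validate_duplicate_uuids collectors)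

-- ===== LEMMAS AND PROOFS =====

-- common reference recursion: walk `rest` keeping the already-seen prefix `pre`;
-- a head whose uuid already occurs in `pre` yields the message built from that
-- first occurrence's host.
def pvGo (pre rest : List (List (String × String))) : List String :=
  match rest with
  | [] => []
  | c :: t =>
    let u := pvKeyD c "uuid"
    match pre.find? (fun d => pvKeyD d "uuid" == u) with
    | some d => pvMsg u (pvKeyD d "host") (pvKeyD c "host") :: pvGo (pre ++ [c]) t
    | none => pvGo (pre ++ [c]) t

-- characterisation of B's pass-1 fold: setdefault keeps the FIRST index per uuid
lemma pvFold_setdefault_get? (l : List (Int × List (String × String)))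
    (d : PySem.Dict String Int) (u : String) :
    ((l.foldl (fun d ic => d.setdefault (pvKeyD ic.2 "uuid") ic.1) d).get? u)
      = (d.get? u).or ((l.find? (fun ic => pvKeyD ic.2 "uuid" == u)).map (·.1)) := by
  induction l generalizing d with
  | nil => simp
  | cons c t ih =>
    simp only [List.foldl_cons, ih, List.find?_cons]
    by_cases hc : (d.contains (pvKeyD c.2 "uuid")) = true
    · rw [PySem.Dict.setdefault_of_contains _ _ hc]
      by_cases hk : (pvKeyD c.2 "uuid" == u) = true
      · have : u = pvKeyD c.2 "uuid" := (eq_of_beq hk).symm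
        subst this
        rw [PySem.Dict.contains_eq_isSome_get?] at hc
        cases hg : d.get? (pvKeyD c.2 "uuid") with
        | none => simp [hg] at hc
        | some j => simp
      · simp [hk]
    · rw [PySem.Dict.setdefault_of_not_contains _ _ (by simpa using hc)]
      by_cases hk : (pvKeyD c.2 "uuid" == u) = true
      · have : u = pvKeyD c.2 "uuid" := (eq_of_beq hk).symm
        subst this
        rw [PySem.Dict.contains_eq_isSome_get?] at hc
        cases hg : d.get? (pvKeyD c.2 "uuid") with
        | none => simp [PySem.Dict.get?_insert_self]
        | some j => rw [hg] at hc; simp at hc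
      · have hne : u ≠ pvKeyD c.2 "uuid" := fun h => hk (by simp [h])
        simp [PySem.Dict.get?_insert, hne, hk]

lemma pvFirstIdx_get? (xs : List (List (String × String))) (u : String) :
    (pvFirstIdx xs).get? u
      = ((PySem.List.enumerate xs).find? (fun ic => pvKeyD ic.2 "uuid" == u)).map (·.1) := by
  simp [pvFirstIdx, pvFold_setdefault_get?]

-- find? over an enumeration, none case
lemma pvEnumFind_none (l : List (List (String × String))) (s : Int) (u : String)
    (h : l.find? (fun d => pvKeyD d "uuid" == u) = none) :
    (PySem.List.enumerate l s).find? (fun ic => pvKeyD ic.2 "uuid" == u) = none := by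
  rw [List.find?_eq_none] at h ⊢
  intro p hp
  obtain ⟨k, hk, rfl⟩ := (PySem.List.mem_enumerate_iff _ _ _).1 hp
  exact h _ (l.getElem_mem hk)

-- find? over an enumeration, some case: same element, index inside the list
lemma pvEnumFind_some (l : List (List (String × String))) (u : String)
    (d0 : List (String × String))
    (h : l.find? (fun d => pvKeyD d "uuid" == u) = some d0) :
    ∀ s : Int, ∃ j : Nat,
      (PySem.List.enumerate l s).find? (fun ic => pvKeyD ic.2 "uuid" == u) = some (s + (j : Int), d0)
      ∧ l[j]? = some d0 := by
  induction l with
  | nil => simp at h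
  | cons c t ih =>
    intro s
    rw [List.find?_cons] at h
    by_cases hc : (pvKeyD c "uuid" == u) = true
    · rw [hc] at h
      injection h with h; subst h
      refine ⟨0, ?_, by simp⟩
      simp [PySem.List.enumerate_cons, hc]
    · have hc' : (pvKeyD c "uuid" == u) = false := by simpa using hc
      rw [hc'] at h
      obtain ⟨j, hj1, hj2⟩ := ih h (s + 1)
      refine ⟨j + 1, ?_, by simpa using hj2⟩
      rw [PySem.List.enumerate_cons, List.find?_cons, hc', hj1]
      have harith : s + 1 + (j : Int) = s + (((j + 1 : Nat)) : Int) := by push_cast; ring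
      rw [harith]

-- A's loop invariant: the seen-dict is exactly "host of the first occurrence in the processed prefix"
lemma pvLoopA : ∀ (rest pre : List (List (String × String))) (errs : List String)
    (seen : PySem.Dict String String),
    (∀ u, seen.get? u
        = (pre.find? (fun d => pvKeyD d "uuid" == u)).map (fun d => pvKeyD d "host")) →
    (rest.foldl
      (fun (st : List String × PySem.Dict String String) c =>
        if st.2.contains (pvKeyD c "uuid") then
          (st.1 ++ [pvMsg (pvKeyD c "uuid") (st.2.getD (pvKeyD c "uuid") "") (pvKeyD c "host")], st.2)
        else
          (st.1, st.2.insert (pvKeyD c "uuid") (pvKeyD c "host"))) (errs, seen)).1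
      = errs ++ pvGo pre rest := by
  intro rest
  induction rest with
  | nil => intro pre errs seen _; simp [pvGo]
  | cons c t ih =>
    intro pre errs seen hseen
    simp only [List.foldl_cons]
    cases hf : pre.find? (fun d => pvKeyD d "uuid" == pvKeyD c "uuid") with
    | some d =>
      have hcon : seen.contains (pvKeyD c "uuid") = true := by
        rw [PySem.Dict.contains_eq_isSome_get?, hseen, hf]; rfl
      have hgetD : seen.getD (pvKeyD c "uuid") "" = pvKeyD d "host" := by
        rw [PySem.Dict.getD_eq_get?_getD, hseen, hf]; rfl
      rw [if_pos hcon, hgetD]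
      have hinv : ∀ u, seen.get? u
          = ((pre ++ [c]).find? (fun d => pvKeyD d "uuid" == u)).map (fun d => pvKeyD d "host") := by
        intro u
        rw [List.find?_append]
        cases hp : pre.find? (fun d => pvKeyD d "uuid" == u) with
        | some e => simp [hseen, hp]
        | none =>
          rw [hseen, hp]
          simp only [Option.map_none, Option.none_or, List.find?_cons, List.find?_nil]
          by_cases hk : (pvKeyD c "uuid" == u) = true
          · exfalso
            have : u = pvKeyD c "uuid" := (eq_of_beq hk).symm
            subst this
            simp [hp] at hf
          · simp [hk]
      rw [ih (pre ++ [c]) _ _ hinv]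
      simp [pvGo, hf]
    | none =>
      have hcon : seen.contains (pvKeyD c "uuid") = false := by
        rw [PySem.Dict.contains_eq_isSome_get?, hseen, hf]; rfl
      rw [if_neg (by simp [hcon])]
      have hinv : ∀ u, (seen.insert (pvKeyD c "uuid") (pvKeyD c "host")).get? u
          = ((pre ++ [c]).find? (fun d => pvKeyD d "uuid" == u)).map (fun d => pvKeyD d "host") := by
        intro u
        rw [List.find?_append, PySem.Dict.get?_insert]
        by_cases he : u = pvKeyD c "uuid"
        · subst he
          rw [if_pos rfl, hf]
          simp
        · rw [if_neg he, hseen]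
          cases hp : pre.find? (fun d => pvKeyD d "uuid" == u) with
          | some e => simp
          | none =>
            have hk : (pvKeyD c "uuid" == u) = false := by
              simpa using fun h => he h.symm
            simp [hk]
      rw [ih (pre ++ [c]) _ _ hinv]
      simp [pvGo, hf]

-- B's comprehension, walked with an explicit processed prefix, is the same recursion
lemma pvLoopB (xs : List (List (String × String))) :
    ∀ (rest pre : List (List (String × String))), xs = pre ++ rest →
    ((PySem.List.enumerate rest ((pre.length : Int))).filterMap (fun ic =>
      if (pvFirstIdx xs).getD (pvKeyD ic.2 "uuid") 0 ≠ ic.1 then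
        some (pvMsg (pvKeyD ic.2 "uuid")
          (pvKeyD (PySem.List.pyGetD xs ((pvFirstIdx xs).getD (pvKeyD ic.2 "uuid") 0) []) "host")
          (pvKeyD ic.2 "host"))
      else none))
      = pvGo pre rest := by
  intro rest
  induction rest with
  | nil => intro pre _; simp [pvGo]
  | cons c t ih =>
    intro pre hxs
    rw [PySem.List.enumerate_cons, List.filterMap_cons]
    have hsplit : (pvFirstIdx xs).get? (pvKeyD c "uuid")
        = (((PySem.List.enumerate pre 0).find?
              (fun ic => pvKeyD ic.2 "uuid" == pvKeyD c "uuid")).or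
           ((PySem.List.enumerate (c :: t) ((pre.length : Int))).find?
              (fun ic => pvKeyD ic.2 "uuid" == pvKeyD c "uuid"))).map (·.1) := by
      rw [pvFirstIdx_get?, hxs, PySem.List.enumerate_append, List.find?_append]
      norm_num
    cases hf : pre.find? (fun d => pvKeyD d "uuid" == pvKeyD c "uuid") with
    | some d =>
      obtain ⟨j, hj1, hj2⟩ := pvEnumFind_some pre (pvKeyD c "uuid") d hf 0
      obtain ⟨hjlt, hpre⟩ := List.getElem?_eq_some_iff.1 hj2
      have hgd : (pvFirstIdx xs).getD (pvKeyD c "uuid") 0 = (j : Int) := by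
        rw [PySem.Dict.getD_eq_get?_getD, hsplit, hj1]
        simp
      have hne : (pvFirstIdx xs).getD (pvKeyD c "uuid") 0 ≠ ((pre.length : Int)) := by
        rw [hgd]; intro hh
        have := Int.ofNat.inj hh
        omega
      have hget : PySem.List.pyGetD xs ((pvFirstIdx xs).getD (pvKeyD c "uuid") 0) [] = d := by
        rw [hgd, PySem.List.pyGetD_eq_getElem xs [] (by omega)
              (by rw [hxs]; simp; omega)]
        have h1 : xs[(j : Int).toNat]? = some d := by
          rw [hxs]
          simp only [Int.toNat_natCast]
          rw [List.getElem?_append_left hjlt]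
          exact hj2
        exact (List.getElem?_eq_some_iff.1 h1).2
      simp only [if_pos hne, hget]
      rw [show ((pre.length : Int) + 1) = (((pre ++ [c]).length : Nat) : Int) by simp]
      rw [ih (pre ++ [c]) (by rw [hxs]; simp)]
      simp [pvGo, hf]
    | none =>
      have hnone := pvEnumFind_none pre 0 (pvKeyD c "uuid") hf
      have hgd : (pvFirstIdx xs).getD (pvKeyD c "uuid") 0 = ((pre.length : Int)) := by
        rw [PySem.Dict.getD_eq_get?_getD, hsplit, hnone]
        rw [PySem.List.enumerate_cons, List.find?_cons]
        simp
      simp only [hgd, ne_eq, not_true_eq_false, if_false]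
      rw [show ((pre.length : Int) + 1) = (((pre ++ [c]).length : Nat) : Int) by simp]
      rw [ih (pre ++ [c]) (by rw [hxs]; simp)]
      simp [pvGo, hf]

theorem validate_duplicate_uuids_spec : Claim_equal_validate_duplicate_uuids := by
  intro xs _ _
  unfold Spec_validate_duplicate_uuids
  have hA : validate_duplicate_uuids xs = pvGo [] xs :=
    (pvLoopA xs [] [] PySem.Dict.empty (by simp)).trans (List.nil_append _)
  have hB : validate_duplicate_uuids_alt xs = pvGo [] xs :=
    pvLoopB xs xs [] rfl
  rw [hA, hB]
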